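-- pv_equiv track=rewrite | github.com/jay-thakur/geeksforgeeks_py | practice/Basic/tiger_zinda_hai.py | tiger_zinda_hai
-- ===== SOURCE A (Python) =====
-- def tiger_zinda_hai(arr, n):
--     s = []
--     t = 0
--     for i in range(n):
--         if arr[i] == "END":
--             s = []
--             t = 0
--         else:
--             if arr[i] not in s:
--                 s.append(arr[i])
--                 t = t + 1
--             else:
--                 s.remove(arr[i])
--                 t = t - 1
--     return t
-- ===== SOURCE B (Python) =====
-- def tiger_zinda_hai(arr, n):
--     seg = arr[:max(n, 0)]
--     tail = []
--     for x in reversed(seg):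
--         if x == "END":
--             break
--         tail.append(x)
--     counts = {}
--     for x in tail:
--         counts[x] = counts.get(x, 0) + 1
--     return sum(1 for c in counts.values() if c % 2 == 1)
-- ===== Notes on version B (the rewrite author's own statement) =====
-- stated objective: faster
-- what changed: Replaces the sequential toggle simulation (reset on END, linear-scan add/remove in a Python list per element) by walking the prefix backwards to collect the segment after the last END and then tallying, via a hash-map frequency count, the distinct elements with odd multiplicity.
import Mathlib
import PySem

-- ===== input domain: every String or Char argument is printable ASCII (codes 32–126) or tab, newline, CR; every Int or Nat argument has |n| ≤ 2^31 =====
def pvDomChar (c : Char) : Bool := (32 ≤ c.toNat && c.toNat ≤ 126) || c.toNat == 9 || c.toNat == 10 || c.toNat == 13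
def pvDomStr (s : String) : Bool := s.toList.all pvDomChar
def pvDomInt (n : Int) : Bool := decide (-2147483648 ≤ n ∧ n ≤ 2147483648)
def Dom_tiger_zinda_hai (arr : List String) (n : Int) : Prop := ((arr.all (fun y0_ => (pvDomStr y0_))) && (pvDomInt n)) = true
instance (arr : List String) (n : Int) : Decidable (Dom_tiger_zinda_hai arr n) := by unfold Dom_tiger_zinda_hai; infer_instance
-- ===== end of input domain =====

-- B collects the segment after the last "END" (backwards walk) and counts the
-- distinct elements with odd multiplicity there, instead of A's step-by-step
-- toggle simulation; equal return values on Pre_ (A raises when n > len(arr)).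

-- ===== PORT A =====
-- one loop step: reset on "END", otherwise toggle arr[i] in s, tracking t
def tzh_step (st : List String × Int) (x : String) : List String × Int :=
  if x = "END" then ([], 0)
  else if x ∈ st.1 then ((PySem.List.remove? st.1 x).getD st.1, st.2 - 1)
  else (st.1 ++ [x], st.2 + 1)

def tiger_zinda_hai (arr : List String) (n : Int) : Int :=
  ((PySem.List.pyRange 0 n 1).foldl
    (fun st i => tzh_step st (PySem.List.pyGetD arr i ""))   -- arr[i]; Pre_ keeps i in range
    ([], 0)).2

-- ===== PORT B =====
-- 'for x in reversed(seg): if x == "END": break; tail.append(x)'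
def tzh_collect (acc : List String) : List String → List String
  | [] => acc
  | x :: rest => if x = "END" then acc else tzh_collect (acc ++ [x]) rest

-- the counts dict then 'sum(1 for c in counts.values() if c % 2 == 1)'
def tzh_tally (tail : List String) : Int :=
  (tail.foldl (fun d x => PySem.Dict.insert d x (PySem.Dict.getD d x 0 + 1))
      PySem.Dict.empty).values.foldl
    (fun acc c => if PySem.Int.mod c 2 == 1 then acc + 1 else acc) 0

def tiger_zinda_hai_alt (arr : List String) (n : Int) : Int :=
  tzh_tally (tzh_collect [] (PySem.List.slice arr none (some (max n 0))).reverse)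

-- ===== PRECONDITION & SPEC =====
-- A evaluates arr[i] for every i < n, so it raises IndexError iff n > len(arr)
def Pre_tiger_zinda_hai (arr : List String) (n : Int) : Prop := n ≤ (arr.length : Int)
instance (arr : List String) (n : Int) : Decidable (Pre_tiger_zinda_hai arr n) := by unfold Pre_tiger_zinda_hai; infer_instance
def pvWitness_tiger_zinda_hai : List String × Int := (["a", "b", "END", "a", "b", "a"], 6)

def Spec_tiger_zinda_hai (arr : List String) (n : Int) (out : Int) : Prop := out = tiger_zinda_hai_alt arr n
instance (arr : List String) (n : Int) (out : Int) : Decidable (Spec_tiger_zinda_hai arr n out) := by unfold Spec_tiger_zinda_hai; infer_instance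

-- ===== CLAIM (what is proved, stated in full; the proofs are below) =====
def Claim_equal_tiger_zinda_hai : Prop := ∀ (arr : List String) (n : Int), Dom_tiger_zinda_hai arr n → Pre_tiger_zinda_hai arr n → Spec_tiger_zinda_hai arr n (tiger_zinda_hai arr n)

-- ===== LEMMAS AND PROOFS =====

lemma tzh_collect_acc (l acc : List String) : tzh_collect acc l = acc ++ tzh_collect [] l := by
  induction l generalizing acc with
  | nil => simp [tzh_collect]
  | cons x rest ih =>
    by_cases hx : x = "END"
    · simp [tzh_collect, hx]
    · simp only [tzh_collect, if_neg hx]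
      rw [List.nil_append, ih (acc ++ [x]), ih [x]]
      simp

-- the collected tail after appending one element on the A side
lemma tzh_collect_snoc (l : List String) (x : String) :
    tzh_collect [] (l ++ [x]).reverse
      = if x = "END" then [] else x :: tzh_collect [] l.reverse := by
  simp only [List.reverse_append, List.reverse_singleton, List.singleton_append]
  by_cases hx : x = "END"
  · simp [tzh_collect, hx]
  · simp only [tzh_collect, if_neg hx]
    rw [List.nil_append, tzh_collect_acc]
    simp

-- loop invariant of A's fold, phrased against B's collected tail
lemma tzh_invariant (l : List String) :
    (l.foldl tzh_step ([], 0)).1.Nodup ∧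
    (l.foldl tzh_step ([], 0)).2 = ((l.foldl tzh_step ([], 0)).1.length : Int) ∧
    (∀ y, y ∈ (l.foldl tzh_step ([], 0)).1 ↔ (tzh_collect [] l.reverse).count y % 2 = 1) := by
  induction l using List.reverseRecOn with
  | nil => simp [tzh_collect]
  | append_singleton l x ih =>
    obtain ⟨hnd, hlen, hmem⟩ := ih
    rw [List.foldl_append]
    simp only [List.foldl_cons, List.foldl_nil]
    set st := l.foldl tzh_step ([], 0) with hst
    rw [tzh_collect_snoc]
    by_cases hx : x = "END"
    · simp [tzh_step, hx]
    · simp only [if_neg hx]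
      by_cases hin : x ∈ st.1
      · have herase : tzh_step st x = (st.1.erase x, st.2 - 1) := by
          simp [tzh_step, hx, hin, PySem.List.remove?_eq_some_erase st.1 x hin]
        rw [herase]
        refine ⟨hnd.erase x, ?_, ?_⟩
        · simp only [hlen, List.length_erase_of_mem hin]
          have : 0 < st.1.length := List.length_pos_of_mem hin
          omega
        · intro y
          rw [hnd.mem_erase_iff]
          by_cases hyx : y = x
          · subst hyx
            have hodd := (hmem y).mp hin
            simp
            omega
          · have hxy : ¬ x = y := fun h => hyx h.symm
            simp [hyx, hmem y, hxy]
      · have happ : tzh_step st x = (st.1 ++ [x], st.2 + 1) := by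
          simp [tzh_step, hx, hin]
        rw [happ]
        refine ⟨?_, ?_, ?_⟩
        · simp [List.nodup_append, hnd]
          exact fun a ha h => hin (h ▸ ha)
        · simp [hlen]
        · intro y
          by_cases hyx : y = x
          · subst hyx
            have : ¬ ((tzh_collect [] l.reverse).count y % 2 = 1) := fun h => hin ((hmem y).mpr h)
            simp [hin]
            omega
          · have hxy : ¬ x = y := fun h => hyx h.symm
            simp [hyx, hmem y, hxy]

-- the dict tally of 'tail' counts exactly the odd-multiplicity distinct elements
lemma tzh_tally_eq (tail : List String) :
    tzh_tally tail
      = (((PySem.Set.ofList tail).filter (fun k => decide (tail.count k % 2 = 1))).length : Int) := by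
  unfold tzh_tally
  rw [PySem.Dict.foldl_insert_getD_add_one_eq_counter]
  have hval : (PySem.Dict.counter tail).values
      = (PySem.Set.ofList tail).map (fun k => (tail.count k : Int)) := by
    show (PySem.Dict.counter tail).items.map (·.2) = _
    rw [PySem.Dict.items_counter, List.map_map]
    rfl
  rw [hval, PySem.List.foldl_if_add_one, List.countP_map, ← List.countP_eq_length_filter, zero_add]
  congr 1
  apply List.countP_congr
  intro k _
  by_cases h : tail.count k % 2 = 1
  · simp [Function.comp, h]
    omega
  · simp [Function.comp, h]
    omega

-- B's tally of 'tail' equals A's running count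
lemma tzh_list_eq_count (l : List String) :
    (l.foldl tzh_step ([], 0)).2 = tzh_tally (tzh_collect [] l.reverse) := by
  obtain ⟨hnd, hlen, hmem⟩ := tzh_invariant l
  set tail := tzh_collect [] l.reverse with htail
  have hperm : (l.foldl tzh_step ([], 0)).1.Perm
      ((PySem.Set.ofList tail).filter (fun k => decide (tail.count k % 2 = 1))) := by
    rw [List.perm_ext_iff_of_nodup hnd ((PySem.Set.nodup_ofList tail).filter _)]
    intro y
    rw [hmem y, List.mem_filter, PySem.Set.mem_ofList]
    constructor
    · intro h
      exact ⟨List.count_pos_iff.mp (by omega), by simpa using h⟩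
    · rintro ⟨-, h⟩
      simpa using h
  rw [tzh_tally_eq, hlen, hperm.length_eq]

-- A's index loop over range(n) is a fold over the prefix arr[:n]
lemma tzh_fold_eq_take (arr : List String) (n : Int) (hle : n ≤ (arr.length : Int)) :
    (PySem.List.pyRange 0 n 1).foldl
        (fun st i => tzh_step st (PySem.List.pyGetD arr i "")) ([], 0)
      = (arr.take n.toNat).foldl tzh_step ([], 0) := by
  by_cases hn : n ≤ 0
  · rw [PySem.List.pyRange_one_eq_nil hn]
    have : n.toNat = 0 := by omega
    simp [this]
  · replace hn : 0 < n := by omega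
    set seg := arr.take n.toNat with hseg
    have hlenseg : (seg.length : Int) = n := by
      simp [hseg]; omega
    have hcongr : (PySem.List.pyRange 0 n 1).foldl
        (fun st i => tzh_step st (PySem.List.pyGetD arr i "")) ([], 0)
        = (PySem.List.pyRange 0 n 1).foldl
        (fun st i => tzh_step st (PySem.List.pyGetD seg i "")) ([], 0) := by
      apply PySem.List.foldl_congr_mem
      intro acc i hi
      rw [PySem.List.mem_pyRange_one] at hi
      congr 1
      rw [PySem.List.pyGetD_eq_getElem arr "" hi.1 (by omega),
          PySem.List.pyGetD_eq_getElem seg "" hi.1 (by rw [hlenseg]; exact hi.2)]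
      exact (List.getElem_take).symm
    rw [hcongr, ← hlenseg]
    exact_mod_cast PySem.List.foldl_pyRange_zero_pyGetD' seg "" tzh_step ([], 0)

-- ===== VERDICT (by name: the statement is the Claim_ definition above) =====
theorem tiger_zinda_hai_spec : Claim_equal_tiger_zinda_hai := by
  intro arr n _ hpre
  unfold Spec_tiger_zinda_hai tiger_zinda_hai tiger_zinda_hai_alt
  rw [tzh_fold_eq_take arr n hpre, tzh_list_eq_count]
  have hslice := PySem.List.slice_to arr (b := max n 0) (by omega)
  have hmax : (max n 0).toNat = n.toNat := by omega
  rw [hmax] at hslice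
  rw [hslice]
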